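-- pv_equiv track=rewrite | github.com/nehabinish/Pagerank-Algorithm | pagerank_adv.py | Nodes
-- ===== SOURCE A (Python) =====
-- def Nodes(C1,C2):
--     '''
--     --------------------------------------------------------------------------
--     function that checks for all the unique values in the list to give
--     total number of nodes.
--     --------------------------------------------------------------------------
--     '''
--     nodes = []
--
--     for i in C1:
--         if(i not in nodes):
--             nodes.append(i)
--
--     for j in C2:
--         if(j not in nodes):
--             nodes.append(j)
--
--     nodes = sorted(nodes) #sorted values of nodes
--
--     N = len(nodes) #total number of nodes
--
--     return nodes,N
-- ===== SOURCE B (Python) =====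
-- def Nodes(C1, C2):
--     # Sort the concatenation once, then collapse adjacent duplicates in a
--     # single pass (prev holds the last emitted value).
--     merged = sorted(C1 + C2)
--     nodes = []
--     prev = None
--     for x in merged:
--         if prev is None or prev != x:
--             nodes.append(x)
--             prev = x
--     return nodes, len(nodes)
-- ===== Notes on version B (the rewrite author's own statement) =====
-- stated objective: faster
-- what changed: Replaces the quadratic membership-scan dedup followed by a sort with sorting the concatenation once and collapsing adjacent duplicates in one linear pass.
import Mathlib
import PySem

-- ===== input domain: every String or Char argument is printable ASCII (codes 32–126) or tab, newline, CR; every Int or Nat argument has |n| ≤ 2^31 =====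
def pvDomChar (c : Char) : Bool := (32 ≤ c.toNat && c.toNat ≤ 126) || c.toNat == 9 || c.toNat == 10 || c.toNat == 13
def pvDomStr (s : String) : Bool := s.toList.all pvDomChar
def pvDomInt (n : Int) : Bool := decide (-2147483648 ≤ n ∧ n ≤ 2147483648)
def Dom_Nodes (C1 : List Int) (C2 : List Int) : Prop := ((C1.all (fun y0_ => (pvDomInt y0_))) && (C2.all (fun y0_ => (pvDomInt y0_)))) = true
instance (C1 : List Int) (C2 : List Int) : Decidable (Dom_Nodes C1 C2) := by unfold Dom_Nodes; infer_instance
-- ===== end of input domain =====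

-- B sorts C1 ++ C2 once and collapses adjacent duplicates in one linear pass,
-- replacing A's quadratic membership-scan dedup followed by a sort (faster).


-- ===== PORT A =====
def Nodes (C1 : List Int) (C2 : List Int) : List Int × Int :=
  let nodes := C1.foldl (fun nodes i => if i ∈ nodes then nodes else nodes ++ [i]) []
  let nodes := C2.foldl (fun nodes j => if j ∈ nodes then nodes else nodes ++ [j]) nodes
  let nodes := PySem.List.sorted nodes (fun x => x) false
  (nodes, (nodes.length : Int))

-- ===== PORT B =====
def Nodes_alt (C1 : List Int) (C2 : List Int) : List Int × Int :=
  let merged := PySem.List.sorted (C1 ++ C2) (fun x => x) false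
  -- loop state (nodes, prev): append x when prev is None or prev != x
  let st := merged.foldl
    (fun st x =>
      match st.2 with
      | none => (st.1 ++ [x], some x)
      | some p => if p ≠ x then (st.1 ++ [x], some x) else st)
    (([] : List Int), (none : Option Int))
  (st.1, (st.1.length : Int))

-- ===== PRECONDITION & SPEC =====
def Spec_Nodes (C1 : List Int) (C2 : List Int) (out : List Int × Int) : Prop := out = Nodes_alt C1 C2
instance (C1 : List Int) (C2 : List Int) (out : List Int × Int) : Decidable (Spec_Nodes C1 C2 out) := by unfold Spec_Nodes; infer_instance

-- ===== CLAIM (what is proved, stated in full; the proofs are below) =====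
def Claim_equal_Nodes : Prop := ∀ (C1 : List Int) (C2 : List Int), Dom_Nodes C1 C2 → Spec_Nodes C1 C2 (Nodes C1 C2)

-- ===== LEMMAS AND PROOFS =====

/-- Recursive model of B's adjacent-dedup loop: `prev` is the last emitted value. -/
def adedup : Option Int → List Int → List Int
  | _, [] => []
  | none, x :: t => x :: adedup (some x) t
  | some p, x :: t => if p ≠ x then x :: adedup (some x) t else adedup (some p) t

/-- A's dedup fold: membership is accumulator ∪ input. -/
theorem memA (xs : List Int) : ∀ (acc : List Int) (a : Int),
    a ∈ xs.foldl (fun nodes i => if i ∈ nodes then nodes else nodes ++ [i]) acc ↔ a ∈ acc ∨ a ∈ xs := by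
  induction xs with
  | nil => simp
  | cons x t ih =>
    intro acc a
    rw [List.foldl_cons]
    by_cases hx : x ∈ acc
    · rw [if_pos hx, ih]
      simp only [List.mem_cons]
      constructor
      · rintro (h | h)
        · exact Or.inl h
        · exact Or.inr (Or.inr h)
      · rintro (h | rfl | h)
        · exact Or.inl h
        · exact Or.inl hx
        · exact Or.inr h
    · rw [if_neg hx, ih]
      simp [or_assoc]

/-- A's dedup fold preserves Nodup. -/
theorem nodupA (xs : List Int) : ∀ (acc : List Int), acc.Nodup →
    (xs.foldl (fun nodes i => if i ∈ nodes then nodes else nodes ++ [i]) acc).Nodup := by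
  induction xs with
  | nil => intro acc h; simpa using h
  | cons x t ih =>
    intro acc hacc
    rw [List.foldl_cons]
    by_cases hx : x ∈ acc
    · rw [if_pos hx]; exact ih acc hacc
    · rw [if_neg hx]
      refine ih _ ?_
      rw [List.nodup_append]
      exact ⟨hacc, List.nodup_singleton x, fun a ha => by simp; exact fun he => hx (he ▸ ha)⟩

/-- B's fold equals the recursive model. -/
theorem foldB (xs : List Int) : ∀ (acc : List Int) (prev : Option Int),
    (xs.foldl
      (fun st x =>
        match st.2 with
        | none => (st.1 ++ [x], some x)
        | some p => if p ≠ x then (st.1 ++ [x], some x) else st)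
      (acc, prev)).1 = acc ++ adedup prev xs := by
  induction xs with
  | nil => simp [adedup]
  | cons x t ih =>
    intro acc prev
    rw [List.foldl_cons]
    cases prev with
    | none =>
      show (List.foldl
        (fun st x =>
          match st.2 with
          | none => (st.1 ++ [x], some x)
          | some p => if p ≠ x then (st.1 ++ [x], some x) else st)
        ((acc ++ [x]), some x) t).1 = acc ++ adedup none (x :: t)
      rw [ih]
      simp [adedup]
    | some p =>
      show (List.foldl
        (fun st x =>
          match st.2 with
          | none => (st.1 ++ [x], some x)
          | some p => if p ≠ x then (st.1 ++ [x], some x) else st)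
        (if p ≠ x then (acc ++ [x], some x) else (acc, some p)) t).1 = acc ++ adedup (some p) (x :: t)
      by_cases hp : p = x
      · rw [if_neg (by simp [hp]), ih]
        simp [adedup, hp]
      · rw [if_pos hp, ih]
        simp [adedup, hp]

/-- On a ≤-sorted tail whose elements all dominate `p`, the model emits exactly
    the elements ≠ p, strictly increasing. -/
theorem adedup_some (s : List Int) : ∀ (p : Int), s.Pairwise (· ≤ ·) → (∀ x ∈ s, p ≤ x) →
    (adedup (some p) s).Pairwise (· < ·) ∧ ∀ a, a ∈ adedup (some p) s ↔ a ∈ s ∧ a ≠ p := by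
  induction s with
  | nil => intro p _ _; simp [adedup]
  | cons x t ih =>
    intro p hs hp
    have hxt : ∀ y ∈ t, x ≤ y := fun y hy => (List.pairwise_cons.mp hs).1 y hy
    have ht : t.Pairwise (· ≤ ·) := (List.pairwise_cons.mp hs).2
    by_cases hpx : p = x
    · subst hpx
      obtain ⟨h1, h2⟩ := ih p ht hxt
      refine ⟨by simpa [adedup] using h1, fun a => ?_⟩
      simp only [adedup, ne_eq, not_true_eq_false, if_false, h2, List.mem_cons]
      constructor
      · rintro ⟨ha, hne⟩; exact ⟨Or.inr ha, hne⟩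
      · rintro ⟨(h | h), hne⟩
        · exact absurd h hne
        · exact ⟨h, hne⟩
    · have hplt : p < x := lt_of_le_of_ne (hp x (by simp)) hpx
      obtain ⟨h1, h2⟩ := ih x ht hxt
      have hmem : ∀ a, a ∈ adedup (some p) (x :: t) ↔ a ∈ x :: t ∧ a ≠ p := by
        intro a
        simp only [adedup, ne_eq, hpx, not_false_eq_true, if_true, List.mem_cons, h2]
        constructor
        · rintro (rfl | ⟨ha, _⟩)
          · exact ⟨Or.inl rfl, by omega⟩
          · exact ⟨Or.inr ha, by have := hxt a ha; omega⟩
        · rintro ⟨(rfl | ha), hne⟩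
          · exact Or.inl rfl
          · by_cases hax : a = x
            · exact Or.inl hax
            · exact Or.inr ⟨ha, hax⟩
      refine ⟨?_, hmem⟩
      simp only [adedup, ne_eq, hpx, not_false_eq_true, if_true]
      refine List.pairwise_cons.mpr ⟨fun a ha => ?_, h1⟩
      have h3 := (h2 a).mp ha
      have := hxt a h3.1
      omega

/-- On a ≤-sorted list, the model starting from None is the strict dedup. -/
theorem adedup_none (s : List Int) (hs : s.Pairwise (· ≤ ·)) :
    (adedup none s).Pairwise (· < ·) ∧ ∀ a, a ∈ adedup none s ↔ a ∈ s := by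
  cases s with
  | nil => simp [adedup]
  | cons x t =>
    have hxt : ∀ y ∈ t, x ≤ y := fun y hy => (List.pairwise_cons.mp hs).1 y hy
    have ht : t.Pairwise (· ≤ ·) := (List.pairwise_cons.mp hs).2
    obtain ⟨h1, h2⟩ := adedup_some t x ht hxt
    constructor
    · refine List.pairwise_cons.mpr ⟨fun a ha => ?_, by simpa [adedup] using h1⟩
      have h3 := (h2 a).mp (by simpa [adedup] using ha)
      have := hxt a h3.1
      omega
    · intro a
      simp only [adedup, List.mem_cons, h2]
      constructor
      · rintro (rfl | ⟨ha, _⟩)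
        · exact Or.inl rfl
        · exact Or.inr ha
      · rintro (rfl | ha)
        · exact Or.inl rfl
        · by_cases hax : a = x
          · exact Or.inl hax
          · exact Or.inr ⟨ha, hax⟩

-- ===== VERDICT (by name: the statement is the Claim_ definition above) =====
theorem Nodes_spec : Claim_equal_Nodes := by
  intro C1 C2 _
  unfold Spec_Nodes Nodes Nodes_alt
  simp only
  set f : List Int → Int → List Int := fun nodes i => if i ∈ nodes then nodes else nodes ++ [i] with hf
  set nodesA : List Int := C2.foldl f (C1.foldl f []) with hnA
  set merged : List Int := PySem.List.sorted (C1 ++ C2) (fun x => x) false with hm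
  have hmer_pw : merged.Pairwise (· ≤ ·) := by
    simpa using PySem.List.sorted_pairwise (xs := C1 ++ C2) (key := fun x => x)
  obtain ⟨hlt, hmem⟩ := adedup_none merged hmer_pw
  -- A's accumulated list: nodup, membership = C1 ++ C2
  have hAnodup : nodesA.Nodup := nodupA C2 _ (nodupA C1 [] List.nodup_nil)
  have hAmem : ∀ a, a ∈ nodesA ↔ a ∈ C1 ++ C2 := by
    intro a
    rw [hnA, memA, memA]
    simp
  -- the two result lists are equal
  have hperm : (adedup none merged).Perm nodesA := by
    rw [List.perm_ext_iff_of_nodup (hlt.imp ne_of_lt) hAnodup]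
    intro a
    rw [hmem, hAmem, hm]
    simp [PySem.List.mem_sorted]
  have hlist : PySem.List.sorted nodesA (fun x => x) false = adedup none merged :=
    PySem.List.sorted_eq_of_perm_of_pairwise_lt nodesA (adedup none merged) (fun x => x) hperm hlt
  have hfold : (merged.foldl
      (fun st x =>
        match st.2 with
        | none => (st.1 ++ [x], some x)
        | some p => if p ≠ x then (st.1 ++ [x], some x) else st)
      (([] : List Int), (none : Option Int))).1 = adedup none merged := by
    simpa using foldB merged [] none
  rw [Prod.ext_iff]
  constructor
  · rw [hfold, hlist]
  · simp only [hfold, hlist]
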